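-- pv_equiv track=rewrite | github.com/Anish932-hash/Jarvis-incomplete- | JARVIS_BACKEND/backend/python/main.py | _recovery_targets_from_issues
-- ===== SOURCE A (Python) =====
-- def _recovery_targets_from_issues(issues: list[str]) -> list[str]:
--     targets: list[str] = []
--     for issue in issues:
--         clean = str(issue or "").strip().lower()
--         if clean.startswith("kernel:"):
--             if "kernel" not in targets:
--                 targets.append("kernel")
--             continue
--         if clean.startswith("desktop-api:"):
--             if "desktop-api" not in targets:
--                 targets.append("desktop-api")
--             continue
--     return targets
-- ===== SOURCE B (Python) =====
-- def _first_match(issues, prefix):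
--     """Index of the first issue whose cleaned text starts with prefix, else None."""
--     for i, issue in enumerate(issues):
--         if str(issue or "").strip().lower().startswith(prefix):
--             return i
--     return None
--
--
-- def _recovery_targets_from_issues(issues: list[str]) -> list[str]:
--     # Per-target search: first occurrence index of each known prefix,
--     # then assemble the answer directly, ordered by first occurrence.
--     ik = _first_match(issues, "kernel:")
--     id_ = _first_match(issues, "desktop-api:")
--     if ik is None and id_ is None:
--         return []
--     if id_ is None:
--         return ["kernel"]
--     if ik is None:
--         return ["desktop-api"]
--     return ["kernel", "desktop-api"] if ik < id_ else ["desktop-api", "kernel"]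
-- ===== Notes on version B (the rewrite author's own statement) =====
-- stated objective: alternative
-- what changed: B replaces A's single accumulating loop with inline dedup by a per-target search: it computes the first-occurrence index of each of the two known prefixes and assembles the result in closed form from those two optional indices, ordered by index.
import Mathlib
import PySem

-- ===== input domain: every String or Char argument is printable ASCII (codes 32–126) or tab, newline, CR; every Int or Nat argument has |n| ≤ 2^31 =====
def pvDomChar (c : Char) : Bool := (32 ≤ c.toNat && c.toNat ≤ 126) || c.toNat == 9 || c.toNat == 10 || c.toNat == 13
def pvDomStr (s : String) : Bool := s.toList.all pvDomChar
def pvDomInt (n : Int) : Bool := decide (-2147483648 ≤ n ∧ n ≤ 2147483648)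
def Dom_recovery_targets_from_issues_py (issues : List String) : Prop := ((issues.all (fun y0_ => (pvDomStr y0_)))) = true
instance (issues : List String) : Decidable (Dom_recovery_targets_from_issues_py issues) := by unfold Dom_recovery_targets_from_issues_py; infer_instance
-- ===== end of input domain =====

-- B replaces A's accumulating loop with a per-target first-occurrence search and closed-form assembly (objective: alternative, same cost).


-- ===== PORT A =====
def recovery_targets_from_issues_py (issues : List String) : List String :=
  issues.foldl (fun targets issue =>
    let clean := PySem.Str.lower (PySem.Str.strip (if issue = "" then "" else issue))
    if PySem.Str.startswith clean "kernel:" then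
      (if "kernel" ∈ targets then targets else targets ++ ["kernel"])
    else if PySem.Str.startswith clean "desktop-api:" then
      (if "desktop-api" ∈ targets then targets else targets ++ ["desktop-api"])
    else targets) []

-- ===== PORT B =====
-- str(issue or "").strip().lower()
def pvClean (issue : String) : String :=
  PySem.Str.lower (PySem.Str.strip (if issue = "" then "" else issue))

-- Source B's _first_match: index of first issue whose cleaned text starts with the prefix
def pvFirstMatch : List String → String → Int → Option Int
  | [], _, _ => none
  | issue :: rest, pre, i =>
    if PySem.Str.startswith (pvClean issue) pre then some i
    else pvFirstMatch rest pre (i + 1)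

def recovery_targets_from_issues_py_alt (issues : List String) : List String :=
  let ik := pvFirstMatch issues "kernel:" 0
  let idd := pvFirstMatch issues "desktop-api:" 0
  match ik, idd with
  | none, none => []
  | some _, none => ["kernel"]
  | none, some _ => ["desktop-api"]
  | some a, some b => if a < b then ["kernel", "desktop-api"] else ["desktop-api", "kernel"]

-- ===== PRECONDITION & SPEC =====
def Spec_recovery_targets_from_issues_py (issues : List String) (out : List String) : Prop := out = recovery_targets_from_issues_py_alt issues
instance (issues : List String) (out : List String) : Decidable (Spec_recovery_targets_from_issues_py issues out) := by unfold Spec_recovery_targets_from_issues_py; infer_instance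

-- ===== CLAIM (what is proved, stated in full; the proofs are below) =====
def Claim_equal_recovery_targets_from_issues_py : Prop := ∀ (issues : List String), Dom_recovery_targets_from_issues_py issues → Spec_recovery_targets_from_issues_py issues (recovery_targets_from_issues_py issues)

-- ===== LEMMAS AND PROOFS =====

def pvStep (targets : List String) (issue : String) : List String :=
  if PySem.Str.startswith (pvClean issue) "kernel:" then
    (if "kernel" ∈ targets then targets else targets ++ ["kernel"])
  else if PySem.Str.startswith (pvClean issue) "desktop-api:" then
    (if "desktop-api" ∈ targets then targets else targets ++ ["desktop-api"])
  else targets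

theorem pvA_eq_foldl (issues : List String) :
    recovery_targets_from_issues_py issues = issues.foldl pvStep [] := rfl

-- a cleaned string cannot start with both prefixes
theorem pv_not_both (l : List Char)
    (hk : PySem.Chars.startswith l ['k', 'e', 'r', 'n', 'e', 'l', ':'] = true)
    (hd : PySem.Chars.startswith l ['d', 'e', 's', 'k', 't', 'o', 'p', '-', 'a', 'p', 'i', ':'] = true) : False := by
  rw [PySem.Chars.startswith_iff] at hk hd
  rcases hk with ⟨tk, hk⟩; rcases hd with ⟨td, hd⟩
  rw [← hd] at hk
  simp at hk

-- once both targets are present the fold is a fixpoint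
theorem pv_fold_fix (is : List String) (t : List String)
    (hk : "kernel" ∈ t) (hd : "desktop-api" ∈ t) : is.foldl pvStep t = t := by
  induction is with
  | nil => rfl
  | cons i rest ih =>
    simp only [List.foldl_cons]
    have : pvStep t i = t := by simp [pvStep, hk, hd]
    rw [this, ih]

theorem pv_fold_kernel (is : List String) (j : Int) :
    is.foldl pvStep ["kernel"]
      = (match pvFirstMatch is "desktop-api:" j with
         | none => ["kernel"]
         | some _ => ["kernel", "desktop-api"]) := by
  induction is generalizing j with
  | nil => rfl
  | cons i rest ih =>
    simp only [List.foldl_cons, pvFirstMatch]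
    by_cases hk : PySem.Chars.startswith (pvClean i).toList ['k', 'e', 'r', 'n', 'e', 'l', ':'] = true
    · have hd : PySem.Chars.startswith (pvClean i).toList ['d', 'e', 's', 'k', 't', 'o', 'p', '-', 'a', 'p', 'i', ':'] = false := by
        by_contra h
        exact pv_not_both _ hk (by revert h; cases PySem.Chars.startswith (pvClean i).toList ['d', 'e', 's', 'k', 't', 'o', 'p', '-', 'a', 'p', 'i', ':'] <;> simp)
      have hs : pvStep ["kernel"] i = ["kernel"] := by simp [pvStep, hk]
      rw [hs, ih (j + 1)]
      simp [hd]
    · by_cases hd : PySem.Chars.startswith (pvClean i).toList ['d', 'e', 's', 'k', 't', 'o', 'p', '-', 'a', 'p', 'i', ':'] = true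
      · have hs : pvStep ["kernel"] i = ["kernel", "desktop-api"] := by
          simp [pvStep, hk, hd]
        rw [hs, pv_fold_fix _ _ (by simp) (by simp)]
        simp [hd]
      · have hs : pvStep ["kernel"] i = ["kernel"] := by simp [pvStep, hk, hd]
        rw [hs, ih (j + 1)]
        simp [hd]

theorem pv_fold_desktop (is : List String) (j : Int) :
    is.foldl pvStep ["desktop-api"]
      = (match pvFirstMatch is "kernel:" j with
         | none => ["desktop-api"]
         | some _ => ["desktop-api", "kernel"]) := by
  induction is generalizing j with
  | nil => rfl
  | cons i rest ih =>
    simp only [List.foldl_cons, pvFirstMatch]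
    by_cases hk : PySem.Chars.startswith (pvClean i).toList ['k', 'e', 'r', 'n', 'e', 'l', ':'] = true
    · have hs : pvStep ["desktop-api"] i = ["desktop-api", "kernel"] := by
        simp [pvStep, hk]
      rw [hs, pv_fold_fix _ _ (by simp) (by simp)]
      simp [hk]
    · have hs : pvStep ["desktop-api"] i = ["desktop-api"] := by
        by_cases hd : PySem.Chars.startswith (pvClean i).toList ['d', 'e', 's', 'k', 't', 'o', 'p', '-', 'a', 'p', 'i', ':'] = true <;>
          simp [pvStep, hk, hd]
      rw [hs, ih (j + 1)]
      simp [hk]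

-- shifting the starting index shifts the result
theorem pvFirstMatch_shift (is : List String) (p : String) (j : Int) :
    pvFirstMatch is p j = (pvFirstMatch is p 0).map (· + j) := by
  induction is generalizing j with
  | nil => rfl
  | cons i rest ih =>
    simp only [pvFirstMatch, PySem.Str.startswith_eq]
    by_cases h : PySem.Chars.startswith (pvClean i).toList p.toList = true
    · simp [h]
    · simp only [h, Bool.false_eq_true, if_false]
      rw [ih (j + 1), ih (0 + 1)]
      cases pvFirstMatch rest p 0 <;> simp <;> ring

theorem pvFirstMatch_nonneg (is : List String) (p : String) (j : Int) (hj : 0 ≤ j)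
    (k : Int) (hk : pvFirstMatch is p j = some k) : j ≤ k := by
  induction is generalizing j with
  | nil => simp [pvFirstMatch] at hk
  | cons i rest ih =>
    simp only [pvFirstMatch] at hk
    split_ifs at hk with h
    · simp at hk; omega
    · have := ih (j + 1) (by omega) hk
      omega

-- ===== VERDICT (by name: the statement is the Claim_ definition above) =====
theorem recovery_targets_from_issues_py_spec : Claim_equal_recovery_targets_from_issues_py := by
  intro issues hdom
  clear hdom
  unfold Spec_recovery_targets_from_issues_py
  rw [pvA_eq_foldl]
  induction issues with
  | nil => rfl
  | cons i rest ih =>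
    simp only [List.foldl_cons, recovery_targets_from_issues_py_alt, pvFirstMatch]
    by_cases hk : PySem.Chars.startswith (pvClean i).toList ['k', 'e', 'r', 'n', 'e', 'l', ':'] = true
    · have hd : PySem.Chars.startswith (pvClean i).toList ['d', 'e', 's', 'k', 't', 'o', 'p', '-', 'a', 'p', 'i', ':'] = false := by
        by_contra h
        exact pv_not_both _ hk (by revert h; cases PySem.Chars.startswith (pvClean i).toList ['d', 'e', 's', 'k', 't', 'o', 'p', '-', 'a', 'p', 'i', ':'] <;> simp)
      have hstep : pvStep [] i = ["kernel"] := by simp [pvStep, hk]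
      rw [hstep, pv_fold_kernel rest 1]
      cases hmd : pvFirstMatch rest "desktop-api:" 1 with
      | none => simp [hk, hd, hmd]
      | some b =>
        have hb : (1 : Int) ≤ b := pvFirstMatch_nonneg rest _ 1 (by omega) b hmd
        simp [hk, hd, hmd, show (0 : Int) < b by omega]
    · by_cases hd : PySem.Chars.startswith (pvClean i).toList ['d', 'e', 's', 'k', 't', 'o', 'p', '-', 'a', 'p', 'i', ':'] = true
      · have hstep : pvStep [] i = ["desktop-api"] := by simp [pvStep, hk, hd]
        rw [hstep, pv_fold_desktop rest 1]
        cases hmk : pvFirstMatch rest "kernel:" 1 with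
        | none => simp [hk, hd, hmk]
        | some a =>
          have ha : (1 : Int) ≤ a := pvFirstMatch_nonneg rest _ 1 (by omega) a hmk
          simp [hk, hd, hmk, show ¬ (a < 0) by omega]
      · have hstep : pvStep [] i = [] := by simp [pvStep, hk, hd]
        rw [hstep, ih]
        have hk' : PySem.Chars.startswith (pvClean i).toList "kernel:".toList = false := by
          simpa using hk
        have hd' : PySem.Chars.startswith (pvClean i).toList "desktop-api:".toList = false := by
          simpa using hd
        simp only [recovery_targets_from_issues_py_alt, PySem.Str.startswith_eq,
          hk', hd', Bool.false_eq_true, if_false]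
        rw [pvFirstMatch_shift rest "kernel:" (0 + 1), pvFirstMatch_shift rest "desktop-api:" (0 + 1)]
        cases pvFirstMatch rest "kernel:" 0 <;> cases pvFirstMatch rest "desktop-api:" 0 <;>
          simp only [Option.map_none, Option.map_some]
        split_ifs with h1 h2 <;> first | rfl | omega
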